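-- pv_equiv track=rewrite | github.com/komarovvy/TicTacToe_SF-B5.6 | TicTacToe.py | line_is_done
-- ===== SOURCE A (Python) =====
-- PLAYER_SIGN = ('x', 'o', '-')
--
-- WIN_LINE_LEN = 3
--
-- def is_win_len(L):
--     while len(L) - WIN_LINE_LEN >=0:
--         same_len = 1
--         char = L.pop()
--         if char == PLAYER_SIGN[2]:
--             continue
--         while L and L[-1] == char:
--             same_len += 1
--             L.pop()
--         if same_len >= WIN_LINE_LEN:
--             return True
--     return False
--
-- def line_is_done(fld):
--     col_num = len(fld[0])
--     row_num = len(fld)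
--     # rows check
--     for row in range(row_num):
--         if is_win_len([fld[row][col] for col in range(col_num)]):
--             return True
--     # columns check
--     for col in range(col_num):
--         if is_win_len([fld[row][col] for row in range(row_num)]):
--             return True
--     #\ diagonal
--     for row in range(row_num):
--         if is_win_len([fld[row+i][i] for i in range(min(row_num-row, col_num))]):
--             return True
--     for col in range(1,col_num):
--         if is_win_len([fld[i][col+i] for i in range(min(row_num, col_num-col))]):
--             return True
--     #/ diagonal
--     for row in range(row_num):
--         if is_win_len([fld[row-i][i] for i in range(min(row+1, col_num))]):
--             return True
--     for col in range(1,col_num):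
--         if is_win_len([fld[row_num-1-i][col+i] for i in range(min(row_num, col_num-col))]):
--             return True
--
--     return False
-- ===== SOURCE B (Python) =====
-- def line_is_done(fld):
--     col_num = len(fld[0])
--     row_num = len(fld)
--     for r in range(row_num):
--         for c in range(col_num):
--             v = fld[r][c]
--             if v == '-':
--                 continue
--             for dr, dc in ((0, 1), (1, 0), (1, 1), (1, -1)):
--                 r2, c2 = r + 2 * dr, c + 2 * dc
--                 if 0 <= r2 < row_num and 0 <= c2 < col_num:
--                     if v == fld[r + dr][c + dc] and v == fld[r2][c2]:
--                         return True
--     return False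
-- ===== Notes on version B (the rewrite author's own statement) =====
-- stated objective: simpler
-- what changed: Replaces A's extraction of every row/column/diagonal into a list followed by a destructive pop-based run-length scan with a single sweep over all cells that checks the four fixed length-3 windows (right, down, down-right, down-left) directly against the bounds.
-- outside the precondition, e.g. on line_is_done([['x', 'x', 'x'], ['o']]): A returns True, B returns True
import Mathlib
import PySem

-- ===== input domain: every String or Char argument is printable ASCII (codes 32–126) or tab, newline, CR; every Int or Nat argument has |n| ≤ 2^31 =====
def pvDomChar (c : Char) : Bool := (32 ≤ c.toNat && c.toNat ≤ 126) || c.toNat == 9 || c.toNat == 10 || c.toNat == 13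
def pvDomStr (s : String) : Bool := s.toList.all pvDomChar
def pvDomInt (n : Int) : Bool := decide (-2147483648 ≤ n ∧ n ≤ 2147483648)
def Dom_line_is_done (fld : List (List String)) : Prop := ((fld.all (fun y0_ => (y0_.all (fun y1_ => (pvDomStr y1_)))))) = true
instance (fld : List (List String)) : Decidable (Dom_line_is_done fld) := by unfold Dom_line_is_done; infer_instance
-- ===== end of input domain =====

-- B replaces A's extraction of every row/column/diagonal followed by a destructive pop-based
-- run-length scan with a single sweep over all cells checking the four fixed length-3 windows
-- (simpler; A mutates the per-line temporary lists it builds, never its argument).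


-- ===== PORT A =====
-- fld[r][c] (both ports; under Pre_ every access is in range, so the defaults are never used)
def pvCell (fld : List (List String)) (r c : Int) : String :=
  PySem.List.pyGetD (PySem.List.pyGetD fld r []) c ""

-- the inner `while L and L[-1] == char: same_len += 1; L.pop()` of is_win_len
def pvInner (char : String) (sameLen : Nat) (L : List String) : Nat × List String :=
  match h : L.getLast? with
  | some c =>
      if c = char then pvInner char (sameLen + 1) L.dropLast
      else (sameLen, L)
  | none => (sameLen, L)
  termination_by L.length
  decreasing_by
    cases L with
    | nil => simp at h
    | cons a as => simp [List.length_dropLast]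

-- used only for is_win_len's termination
theorem pvInner_len_le (char : String) (k : Nat) (L : List String) :
    (pvInner char k L).2.length ≤ L.length := by
  fun_induction pvInner with
  | case1 k L h ih =>
      have hL : L ≠ [] := by intro hL; subst hL; simp at h
      have := @List.length_dropLast _ L
      omega
  | case2 => simp
  | case3 => simp

-- is_win_len, popping from the tail of L exactly as the Python does
def pvIsWinLen (L : List String) : Bool :=
  if 3 ≤ L.length then
    let char := L.getLast?.getD ""
    let L1 := L.dropLast
    if char = "-" then pvIsWinLen L1
    else
      let p := pvInner char 1 L1
      if 3 ≤ p.1 then true else pvIsWinLen p.2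
  else false
  termination_by L.length
  decreasing_by
  · cases L with
    | nil => simp_all
    | cons a as => simp [List.length_dropLast]
  · cases L with
    | nil => simp_all
    | cons a as =>
        have h1 := pvInner_len_le ((a :: as).getLast?.getD "") 1 ((a :: as).dropLast)
        have h2 := @List.length_dropLast _ (a :: as)
        simp only [List.length_cons] at *
        omega

def line_is_done (fld : List (List String)) : Bool :=
  let colNum : Int := (PySem.List.pyGetD fld 0 []).length
  let rowNum : Int := fld.length
  -- rows check
  ((PySem.List.pyRange 0 rowNum 1).any fun row =>
      pvIsWinLen ((PySem.List.pyRange 0 colNum 1).map fun col => pvCell fld row col))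
  -- columns check
  || ((PySem.List.pyRange 0 colNum 1).any fun col =>
      pvIsWinLen ((PySem.List.pyRange 0 rowNum 1).map fun row => pvCell fld row col))
  -- \ diagonal
  || ((PySem.List.pyRange 0 rowNum 1).any fun row =>
      pvIsWinLen ((PySem.List.pyRange 0 (min (rowNum - row) colNum) 1).map fun i =>
        pvCell fld (row + i) i))
  || ((PySem.List.pyRange 1 colNum 1).any fun col =>
      pvIsWinLen ((PySem.List.pyRange 0 (min rowNum (colNum - col)) 1).map fun i =>
        pvCell fld i (col + i)))
  -- / diagonal
  || ((PySem.List.pyRange 0 rowNum 1).any fun row =>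
      pvIsWinLen ((PySem.List.pyRange 0 (min (row + 1) colNum) 1).map fun i =>
        pvCell fld (row - i) i))
  || ((PySem.List.pyRange 1 colNum 1).any fun col =>
      pvIsWinLen ((PySem.List.pyRange 0 (min rowNum (colNum - col)) 1).map fun i =>
        pvCell fld (rowNum - 1 - i) (col + i)))

-- ===== PORT B =====
def pvDirs : List (Int × Int) := [(0, 1), (1, 0), (1, 1), (1, -1)]

def line_is_done_alt (fld : List (List String)) : Bool :=
  let colNum : Int := (PySem.List.pyGetD fld 0 []).length
  let rowNum : Int := fld.length
  (PySem.List.pyRange 0 rowNum 1).any fun r =>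
    (PySem.List.pyRange 0 colNum 1).any fun c =>
      let v := pvCell fld r c
      if v = "-" then false
      else pvDirs.any fun d =>
        let r2 := r + 2 * d.1
        let c2 := c + 2 * d.2
        decide (0 ≤ r2) && decide (r2 < rowNum) && decide (0 ≤ c2) && decide (c2 < colNum)
          && (v == pvCell fld (r + d.1) (c + d.2)) && (v == pvCell fld r2 c2)

-- ===== PRECONDITION & SPEC =====
-- Pre_ excludes the empty board (fld[0] raises IndexError in both programs) and ragged boards in
-- which some row is shorter than the first row: there an indexing IndexError is reachable in both
-- programs, and whether A (line-by-line) or B (cell-by-cell) raises or returns first is an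
-- accident of scan order.
def Pre_line_is_done (fld : List (List String)) : Prop :=
  fld ≠ [] ∧ ∀ row ∈ fld, (fld.headD []).length ≤ row.length
instance (fld : List (List String)) : Decidable (Pre_line_is_done fld) := by
  unfold Pre_line_is_done; infer_instance

def pvWitness_line_is_done : List (List String) :=
  [["x", "o", "-"], ["o", "x", "-"], ["-", "-", "x"]]

def Spec_line_is_done (fld : List (List String)) (out : Bool) : Prop := out = line_is_done_alt fld
instance (fld : List (List String)) (out : Bool) : Decidable (Spec_line_is_done fld out) := by
  unfold Spec_line_is_done; infer_instance

-- ===== CLAIM (what is proved, stated in full; the proofs are below) =====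
def Claim_equal_line_is_done : Prop :=
  ∀ (fld : List (List String)), Dom_line_is_done fld → Pre_line_is_done fld →
    Spec_line_is_done fld (line_is_done fld)

-- ===== LEMMAS AND PROOFS =====

-- `L contains three consecutive equal non-"-" entries`
def HasT (L : List String) : Prop :=
  ∃ s k, s ≠ "-" ∧ L[k]? = some s ∧ L[k + 1]? = some s ∧ L[k + 2]? = some s

theorem pvInner_spec (char : String) (k : Nat) (L : List String) :
    ∃ j L', pvInner char k L = (k + j, L') ∧ L = L' ++ List.replicate j char ∧
      ∀ x, L'.getLast? = some x → x ≠ char := by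
  fun_induction pvInner with
  | case1 k L h ih =>
      obtain ⟨j, L', h1, h2, h3⟩ := ih
      refine ⟨j + 1, L', ?_, ?_, h3⟩
      · rw [h1]; congr 1; omega
      · have := List.dropLast_append_getLast? char h
        rw [List.replicate_succ', ← List.append_assoc, ← h2, this]
  | case2 k L c h hc =>
      refine ⟨0, L, by simp, by simp, fun x hx => ?_⟩
      rw [h] at hx; simp at hx; subst hx; exact hc
  | case3 k L h =>
      refine ⟨0, L, by simp, by simp, fun x hx => ?_⟩
      rw [h] at hx; exact absurd hx (by simp)

theorem hasT_length (L : List String) (h : HasT L) : 3 ≤ L.length := by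
  obtain ⟨s, k, _, _, _, h2⟩ := h
  have := (List.getElem?_eq_some_iff.mp h2).1
  omega

theorem hasT_append_left (L R : List String) (h : HasT L) : HasT (L ++ R) := by
  obtain ⟨s, k, hs, h0, h1, h2⟩ := h
  have hk := (List.getElem?_eq_some_iff.mp h2).1
  exact ⟨s, k, hs,
    by rw [List.getElem?_append_left (by omega)]; exact h0,
    by rw [List.getElem?_append_left (by omega)]; exact h1,
    by rw [List.getElem?_append_left (by omega)]; exact h2⟩

theorem hasT_append_dash (L : List String) : HasT (L ++ ["-"]) ↔ HasT L := by
  constructor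
  · rintro ⟨s, k, hs, h0, h1, h2⟩
    have hk := (List.getElem?_eq_some_iff.mp h2).1
    simp only [List.length_append, List.length_cons, List.length_nil] at hk
    by_cases hlt : k + 2 < L.length
    · exact ⟨s, k, hs,
        by rw [List.getElem?_append_left (by omega)] at h0; exact h0,
        by rw [List.getElem?_append_left (by omega)] at h1; exact h1,
        by rw [List.getElem?_append_left (by omega)] at h2; exact h2⟩
    · exfalso
      have he : k + 2 = L.length := by omega
      rw [List.getElem?_append_right (by omega)] at h2
      rw [he] at h2; simp at h2
      exact hs h2.symm
  · exact hasT_append_left L _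

theorem hasT_append_short_run (L : List String) (char : String) (r : Nat)
    (hlast : ∀ x, L.getLast? = some x → x ≠ char) (hr : r ≤ 2) :
    HasT (L ++ List.replicate r char) ↔ HasT L := by
  constructor
  · rintro ⟨s, k, hs, h0, h1, h2⟩
    have hk := (List.getElem?_eq_some_iff.mp h2).1
    simp only [List.length_append, List.length_replicate] at hk
    by_cases hlt : k + 2 < L.length
    · exact ⟨s, k, hs,
        by rw [List.getElem?_append_left (by omega)] at h0; exact h0,
        by rw [List.getElem?_append_left (by omega)] at h1; exact h1,
        by rw [List.getElem?_append_left (by omega)] at h2; exact h2⟩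
    · exfalso
      -- k + 2 lands in the replicate run, so s = char
      have hrun : s = char := by
        rw [List.getElem?_append_right (by omega)] at h2
        have : (List.replicate r char)[k + 2 - L.length]? = some char := by
          rw [List.getElem?_replicate, if_pos (by omega)]
        rw [this] at h2; exact (Option.some_inj.mp h2).symm
      -- either position k or k+1 is the last entry of L
      have hgl : L.getLast? = L[L.length - 1]? := List.getLast?_eq_getElem?
      by_cases hk1 : k + 1 < L.length
      · -- then k + 1 = L.length - 1
        have he : k + 1 = L.length - 1 := by omega
        rw [List.getElem?_append_left (by omega)] at h1
        have : L.getLast? = some s := by rw [hgl, ← he]; exact h1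
        exact hlast s this hrun
      · -- k < L.length and k = L.length - 1
        have hkl : k < L.length := by omega
        have he : k = L.length - 1 := by omega
        rw [List.getElem?_append_left (by omega)] at h0
        have : L.getLast? = some s := by rw [hgl, ← he]; exact h0
        exact hlast s this hrun
  · exact hasT_append_left L _

theorem hasT_long_run (L : List String) (char : String) (r : Nat)
    (hchar : char ≠ "-") (hr : 3 ≤ r) : HasT (L ++ List.replicate r char) := by
  refine ⟨char, L.length, hchar, ?_, ?_, ?_⟩ <;>
    · rw [List.getElem?_append_right (by omega), List.getElem?_replicate]
      rw [if_pos (by omega)]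

theorem pvIsWinLen_iff (L : List String) : pvIsWinLen L = true ↔ HasT L := by
  fun_induction pvIsWinLen with
  | case1 L hlen char L1 hc ih =>
      have hne : L ≠ [] := by
        intro hL; subst hL; simp at *
      obtain ⟨x, hx⟩ : ∃ x, L.getLast? = some x := by
        cases hgl : L.getLast? with
        | none => exact absurd (List.getLast?_eq_none_iff.mp hgl) hne
        | some y => exact ⟨y, rfl⟩
      have hcx : char = x := by
        rw [show char = L.getLast?.getD "" from rfl, hx]; rfl
      rw [ih]
      conv_rhs => rw [← List.dropLast_append_getLast? x hx]
      rw [← hcx, hc]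
      show HasT L1 ↔ HasT (L1 ++ ["-"])
      exact (hasT_append_dash _).symm
  | case2 L hlen char L1 hc p hp =>
      have hne : L ≠ [] := by
        intro hL; subst hL; simp at *
      obtain ⟨x, hx⟩ : ∃ x, L.getLast? = some x := by
        cases hgl : L.getLast? with
        | none => exact absurd (List.getLast?_eq_none_iff.mp hgl) hne
        | some y => exact ⟨y, rfl⟩
      have hcx : char = x := by
        rw [show char = L.getLast?.getD "" from rfl, hx]; rfl
      obtain ⟨j, L2, heq, hdec, hlast⟩ := pvInner_spec char 1 L1
      rw [show p = pvInner char 1 L1 from rfl, heq] at hp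
      simp only [true_iff]
      conv_rhs => rw [← List.dropLast_append_getLast? x hx]
      show HasT (L1 ++ [x])
      rw [hdec, hcx, List.append_assoc, ← List.replicate_succ']
      refine hasT_long_run L2 x (j + 1) ?_ ?_
      · rw [← hcx]; exact hc
      · simp at hp; omega
  | case3 L hlen char L1 hc p hp ih =>
      have hne : L ≠ [] := by
        intro hL; subst hL; simp at *
      obtain ⟨x, hx⟩ : ∃ x, L.getLast? = some x := by
        cases hgl : L.getLast? with
        | none => exact absurd (List.getLast?_eq_none_iff.mp hgl) hne
        | some y => exact ⟨y, rfl⟩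
      have hcx : char = x := by
        rw [show char = L.getLast?.getD "" from rfl, hx]; rfl
      obtain ⟨j, L2, heq, hdec, hlast⟩ := pvInner_spec char 1 L1
      rw [show p = pvInner char 1 L1 from rfl, heq] at hp
      have hp2 : p.2 = L2 := by rw [show p = pvInner char 1 L1 from rfl, heq]
      rw [hp2] at ih
      rw [hp2, ih]
      conv_rhs => rw [← List.dropLast_append_getLast? x hx]
      show HasT L2 ↔ HasT (L1 ++ [x])
      rw [hdec, hcx, List.append_assoc, ← List.replicate_succ']
      refine (hasT_append_short_run L2 x (j + 1) ?_ ?_).symm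
      · intro y hy; rw [← hcx]; exact hlast y hy
      · simp at hp; omega
  | case4 L hlen =>
      simp only [Bool.false_eq_true, false_iff]
      intro h
      exact hlen (by have := hasT_length L h; omega)


theorem getElem?_map_pyRange0 (g : Int → String) (e : Int) (k : Nat) :
    ((PySem.List.pyRange 0 e 1).map g)[k]? = if (k : Int) < e then some (g k) else none := by
  split_ifs with h
  · simp only [List.getElem?_map, PySem.List.getElem?_pyRange_one]
    rw [if_pos (by omega)]
    simp
  · simp only [List.getElem?_map, PySem.List.getElem?_pyRange_one]
    rw [if_neg (by omega)]
    simp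

theorem hasT_map_pyRange (g : Int → String) (e : Int) :
    HasT ((PySem.List.pyRange 0 e 1).map g) ↔
      ∃ i : Int, 0 ≤ i ∧ i + 2 < e ∧ g i ≠ "-" ∧ g i = g (i + 1) ∧ g i = g (i + 2) := by
  constructor
  · rintro ⟨s, k, hs, h0, h1, h2⟩
    rw [getElem?_map_pyRange0] at h0 h1 h2
    by_cases h : ((k : Nat) + 2 : Int) < e
    · rw [if_pos (by omega)] at h0
      rw [if_pos (by push_cast; omega)] at h1
      rw [if_pos (by push_cast; omega)] at h2
      refine ⟨(k : Int), by omega, by omega, ?_, ?_, ?_⟩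
      · rw [Option.some_inj.mp h0]; exact hs
      · have h1' := Option.some_inj.mp h1
        rw [show ((k + 1 : ℕ) : ℤ) = (k : ℤ) + 1 by push_cast; ring] at h1'
        rw [Option.some_inj.mp h0, ← h1']
      · have h2' := Option.some_inj.mp h2
        rw [show ((k + 2 : ℕ) : ℤ) = (k : ℤ) + 2 by push_cast; ring] at h2'
        rw [Option.some_inj.mp h0, ← h2']
    · rw [if_neg (by push_cast; omega)] at h2
      exact absurd h2 (by simp)
  · rintro ⟨i, hi0, hi2, hne, he1, he2⟩
    refine ⟨g i, i.toNat, hne, ?_, ?_, ?_⟩ <;>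
      rw [getElem?_map_pyRange0]
    · rw [if_pos (by omega)]
      congr 1; congr 1; omega
    · rw [if_pos (by push_cast; omega)]
      rw [he1]; congr 1; congr 1; push_cast; omega
    · rw [if_pos (by push_cast; omega)]
      rw [he2]; congr 1; congr 1; push_cast; omega

def WinSpec (fld : List (List String)) (m n : Int) : Prop :=
  ∃ r c dr dc : Int,
    ((dr = 0 ∧ dc = 1) ∨ (dr = 1 ∧ dc = 0) ∨ (dr = 1 ∧ dc = 1) ∨ (dr = 1 ∧ dc = -1)) ∧
    0 ≤ r ∧ r < m ∧ 0 ≤ c ∧ c < n ∧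
    0 ≤ r + 2 * dr ∧ r + 2 * dr < m ∧ 0 ≤ c + 2 * dc ∧ c + 2 * dc < n ∧
    pvCell fld r c ≠ "-" ∧ pvCell fld r c = pvCell fld (r + dr) (c + dc) ∧
    pvCell fld r c = pvCell fld (r + 2 * dr) (c + 2 * dc)

theorem alt_iff (fld : List (List String)) :
    line_is_done_alt fld = true ↔
      WinSpec fld (fld.length : Int) ((PySem.List.pyGetD fld 0 []).length : Int) := by
  unfold line_is_done_alt WinSpec
  simp only [pvDirs, List.any_eq_true, PySem.List.mem_pyRange_one, Bool.and_eq_true,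
    decide_eq_true_eq, beq_iff_eq, List.mem_cons, Bool.if_false_left,
    Bool.and_eq_true, Bool.not_eq_true', decide_eq_false_iff_not]
  constructor
  · rintro ⟨r, ⟨hr0, hr1⟩, c, ⟨hc0, hc1⟩, hne, d, hd, ⟨⟨⟨hb1, hb2⟩, hb3⟩, he1⟩, he2⟩
    rcases hd with h | h | h | h | h
    · subst h; exact ⟨r, c, 0, 1, Or.inl ⟨rfl, rfl⟩, hr0, hr1, hc0, hc1, hb1.1, hb1.2, hb2, hb3, hne, he1, he2⟩
    · subst h; exact ⟨r, c, 1, 0, Or.inr (Or.inl ⟨rfl, rfl⟩), hr0, hr1, hc0, hc1, hb1.1, hb1.2, hb2, hb3, hne, he1, he2⟩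
    · subst h; exact ⟨r, c, 1, 1, Or.inr (Or.inr (Or.inl ⟨rfl, rfl⟩)), hr0, hr1, hc0, hc1, hb1.1, hb1.2, hb2, hb3, hne, he1, he2⟩
    · subst h; exact ⟨r, c, 1, -1, Or.inr (Or.inr (Or.inr ⟨rfl, rfl⟩)), hr0, hr1, hc0, hc1, hb1.1, hb1.2, hb2, hb3, hne, he1, he2⟩
    · simp at h
  · rintro ⟨r, c, dr, dc, hd, hr0, hr1, hc0, hc1, hb1, hb2, hb3, hb4, hne, he1, he2⟩
    rcases hd with ⟨h1, h2⟩ | ⟨h1, h2⟩ | ⟨h1, h2⟩ | ⟨h1, h2⟩ <;> subst h1 <;> subst h2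
    · exact ⟨r, ⟨hr0, hr1⟩, c, ⟨hc0, hc1⟩, hne, (0, 1), Or.inl rfl, ⟨⟨⟨⟨⟨hb1, hb2⟩, hb3⟩, hb4⟩, he1⟩, he2⟩⟩
    · exact ⟨r, ⟨hr0, hr1⟩, c, ⟨hc0, hc1⟩, hne, (1, 0), Or.inr (Or.inl rfl), ⟨⟨⟨⟨⟨hb1, hb2⟩, hb3⟩, hb4⟩, he1⟩, he2⟩⟩
    · exact ⟨r, ⟨hr0, hr1⟩, c, ⟨hc0, hc1⟩, hne, (1, 1), Or.inr (Or.inr (Or.inl rfl)), ⟨⟨⟨⟨⟨hb1, hb2⟩, hb3⟩, hb4⟩, he1⟩, he2⟩⟩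
    · exact ⟨r, ⟨hr0, hr1⟩, c, ⟨hc0, hc1⟩, hne, (1, -1), Or.inr (Or.inr (Or.inr (Or.inl rfl))), ⟨⟨⟨⟨⟨hb1, hb2⟩, hb3⟩, hb4⟩, he1⟩, he2⟩⟩

theorem pvCell_congr (fld : List (List String)) {r r' c c' : Int} (hr : r = r')
    (hc : c = c') : pvCell fld r c = pvCell fld r' c' := by rw [hr, hc]

theorem a_iff (fld : List (List String)) :
    line_is_done fld = true ↔
      WinSpec fld (fld.length : Int) ((PySem.List.pyGetD fld 0 []).length : Int) := by
  unfold line_is_done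
  simp only [Bool.or_eq_true, List.any_eq_true, PySem.List.mem_pyRange_one,
    pvIsWinLen_iff, hasT_map_pyRange]
  unfold WinSpec
  set m : Int := (fld.length : Int) with hm
  set n : Int := ((PySem.List.pyGetD fld 0 []).length : Int) with hn
  constructor
  · rintro (((((⟨x, ⟨hx0, hx1⟩, i, hi0, hi2, hne, e1, e2⟩ |
        ⟨x, ⟨hx0, hx1⟩, i, hi0, hi2, hne, e1, e2⟩) |
        ⟨x, ⟨hx0, hx1⟩, i, hi0, hi2, hne, e1, e2⟩) |
        ⟨x, ⟨hx0, hx1⟩, i, hi0, hi2, hne, e1, e2⟩) |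
        ⟨x, ⟨hx0, hx1⟩, i, hi0, hi2, hne, e1, e2⟩) |
        ⟨x, ⟨hx0, hx1⟩, i, hi0, hi2, hne, e1, e2⟩)
    -- rows: window (x, i) dir (0,1)
    · refine ⟨x, i, 0, 1, Or.inl ⟨rfl, rfl⟩, by omega, by omega, by omega, by omega,
        by omega, by omega, by omega, by omega, hne, ?_, ?_⟩
      · exact e1.trans (pvCell_congr fld (by omega) (by omega))
      · exact e2.trans (pvCell_congr fld (by omega) (by omega))
    -- columns: window (i, x) dir (1,0)
    · refine ⟨i, x, 1, 0, Or.inr (Or.inl ⟨rfl, rfl⟩), by omega, by omega, by omega, by omega,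
        by omega, by omega, by omega, by omega, hne, ?_, ?_⟩
      · exact e1.trans (pvCell_congr fld (by omega) (by omega))
      · exact e2.trans (pvCell_congr fld (by omega) (by omega))
    -- \-diagonal from column 0: window (x + i, i) dir (1,1)
    · refine ⟨x + i, i, 1, 1, Or.inr (Or.inr (Or.inl ⟨rfl, rfl⟩)), by omega, by omega,
        by omega, by omega, by omega, by omega, by omega, by omega, hne, ?_, ?_⟩
      · exact e1.trans (pvCell_congr fld (by omega) (by omega))
      · exact e2.trans (pvCell_congr fld (by omega) (by omega))
    -- \-diagonal from row 0: window (i, x + i) dir (1,1)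
    · refine ⟨i, x + i, 1, 1, Or.inr (Or.inr (Or.inl ⟨rfl, rfl⟩)), by omega, by omega,
        by omega, by omega, by omega, by omega, by omega, by omega, hne, ?_, ?_⟩
      · exact e1.trans (pvCell_congr fld (by omega) (by omega))
      · exact e2.trans (pvCell_congr fld (by omega) (by omega))
    -- /-diagonal from column 0: window (x - i - 2, i + 2) dir (1,-1)
    · have hcc : pvCell fld (x - i - 2) (i + 2) = pvCell fld (x - i) i :=
        (pvCell_congr fld (show x - i - 2 = x - (i + 2) by omega) rfl).trans e2.symm
      refine ⟨x - i - 2, i + 2, 1, -1, Or.inr (Or.inr (Or.inr ⟨rfl, rfl⟩)), by omega, by omega,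
        by omega, by omega, by omega, by omega, by omega, by omega, ?_, ?_, ?_⟩
      · rw [hcc]; exact hne
      · exact hcc.trans (e1.trans (pvCell_congr fld (by omega) (by omega)))
      · exact hcc.trans (pvCell_congr fld (by omega) (by omega))
    -- /-diagonal from the last row: window (m - 3 - i, x + i + 2) dir (1,-1)
    · have hcc : pvCell fld (m - 3 - i) (x + i + 2) = pvCell fld (m - 1 - i) (x + i) :=
        (pvCell_congr fld (show m - 3 - i = m - 1 - (i + 2) by omega)
          (show x + i + 2 = x + (i + 2) by omega)).trans e2.symm
      refine ⟨m - 3 - i, x + i + 2, 1, -1, Or.inr (Or.inr (Or.inr ⟨rfl, rfl⟩)), by omega,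
        by omega, by omega, by omega, by omega, by omega, by omega, by omega, ?_, ?_, ?_⟩
      · rw [hcc]; exact hne
      · exact hcc.trans (e1.trans (pvCell_congr fld (by omega) (by omega)))
      · exact hcc.trans (pvCell_congr fld (by omega) (by omega))
  · rintro ⟨r, c, dr, dc, (⟨h1, h2⟩ | ⟨h1, h2⟩ | ⟨h1, h2⟩ | ⟨h1, h2⟩), hr0, hr1, hc0, hc1,
      hb1, hb2, hb3, hb4, hne, he1, he2⟩ <;> subst h1 <;> subst h2
    -- dir (0,1): row r
    · refine Or.inl (Or.inl (Or.inl (Or.inl (Or.inl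
        ⟨r, ⟨by omega, by omega⟩, c, by omega, by omega, hne, ?_, ?_⟩))))
      · exact he1.trans (pvCell_congr fld (by omega) (by omega))
      · exact he2.trans (pvCell_congr fld (by omega) (by omega))
    -- dir (1,0): column c
    · refine Or.inl (Or.inl (Or.inl (Or.inl (Or.inr
        ⟨c, ⟨by omega, by omega⟩, r, by omega, by omega, hne, ?_, ?_⟩))))
      · exact he1.trans (pvCell_congr fld (by omega) (by omega))
      · exact he2.trans (pvCell_congr fld (by omega) (by omega))
    -- dir (1,1): the two \-diagonal families
    · by_cases hrc : c ≤ r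
      · refine Or.inl (Or.inl (Or.inl (Or.inr
          ⟨r - c, ⟨by omega, by omega⟩, c, by omega, by omega, ?_, ?_, ?_⟩)))
        · rw [pvCell_congr fld (show r - c + c = r by omega) rfl]; exact hne
        · exact (pvCell_congr fld (show r - c + c = r by omega) rfl).trans
            (he1.trans (pvCell_congr fld (by omega) (by omega)))
        · exact (pvCell_congr fld (show r - c + c = r by omega) rfl).trans
            (he2.trans (pvCell_congr fld (by omega) (by omega)))
      · refine Or.inl (Or.inl (Or.inr
          ⟨c - r, ⟨by omega, by omega⟩, r, by omega, by omega, ?_, ?_, ?_⟩))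
        · rw [pvCell_congr fld rfl (show c - r + r = c by omega)]; exact hne
        · exact (pvCell_congr fld rfl (show c - r + r = c by omega)).trans
            (he1.trans (pvCell_congr fld (by omega) (by omega)))
        · exact (pvCell_congr fld rfl (show c - r + r = c by omega)).trans
            (he2.trans (pvCell_congr fld (by omega) (by omega)))
    -- dir (1,-1): the two /-diagonal families
    · by_cases hrc : r + c < m
      · refine Or.inl (Or.inr
          ⟨r + c, ⟨by omega, by omega⟩, c - 2, by omega, by omega, ?_, ?_, ?_⟩)
        · rw [(pvCell_congr fld (show r + c - (c - 2) = r + 2 by omega)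
            (show c - 2 = c + 2 * (-1) by omega)).trans he2.symm]
          exact hne
        · refine ((pvCell_congr fld (show r + c - (c - 2) = r + 2 by omega)
            (show c - 2 = c + 2 * (-1) by omega)).trans he2.symm).trans ?_
          exact he1.trans (pvCell_congr fld (by omega) (by omega))
        · refine ((pvCell_congr fld (show r + c - (c - 2) = r + 2 by omega)
            (show c - 2 = c + 2 * (-1) by omega)).trans he2.symm).trans ?_
          exact pvCell_congr fld (by omega) (by omega)
      · refine Or.inr
          ⟨r + c - m + 1, ⟨by omega, by omega⟩, m - 3 - r, by omega, by omega, ?_, ?_, ?_⟩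
        · rw [(pvCell_congr fld (show m - 1 - (m - 3 - r) = r + 2 by omega)
            (show r + c - m + 1 + (m - 3 - r) = c + 2 * (-1) by omega)).trans he2.symm]
          exact hne
        · refine ((pvCell_congr fld (show m - 1 - (m - 3 - r) = r + 2 by omega)
            (show r + c - m + 1 + (m - 3 - r) = c + 2 * (-1) by omega)).trans he2.symm).trans ?_
          exact he1.trans (pvCell_congr fld (by omega) (by omega))
        · refine ((pvCell_congr fld (show m - 1 - (m - 3 - r) = r + 2 by omega)
            (show r + c - m + 1 + (m - 3 - r) = c + 2 * (-1) by omega)).trans he2.symm).trans ?_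
          exact pvCell_congr fld (by omega) (by omega)

theorem main_eq (fld : List (List String)) : line_is_done fld = line_is_done_alt fld := by
  rw [Bool.eq_iff_iff, a_iff, alt_iff]

-- ===== VERDICT (by name: the statement is the Claim_ definition above) =====
theorem line_is_done_spec : Claim_equal_line_is_done := by
  intro fld _ _
  exact main_eq fld
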